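-- pv_equiv track=rewrite | github.com/valentinazie/smart-doc-extraction | ppt_extraction/mixins/reading_order.py | _get_reading_order_span
-- ===== SOURCE A (Python) =====
-- def _get_reading_order_span(root_box, members):
--     """Calculate the reading order span of a group"""
--     if not members:
--         root_order = root_box.get('reading_order', 999)
--         return {'min': root_order, 'max': root_order, 'span': 1}
--
--     all_orders = [root_box.get('reading_order', 999)]
--     all_orders.extend([m['box'].get('reading_order', 999) for m in members])
--
--     valid_orders = [o for o in all_orders if o != 999]
--     if not valid_orders:
--         return {'min': 999, 'max': 999, 'span': 1}
--
--     return {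
--         'min': min(valid_orders),
--         'max': max(valid_orders),
--         'span': max(valid_orders) - min(valid_orders) + 1
--     }
-- ===== SOURCE B (Python) =====
-- def _get_reading_order_span(root_box, members):
--     """Calculate the reading order span of a group"""
--     mn = mx = None
--     o = root_box.get('reading_order', 999)
--     if o != 999:
--         mn = mx = o
--     for m in members:
--         o = m['box'].get('reading_order', 999)
--         if o != 999:
--             mn = o if mn is None or o < mn else mn
--             mx = o if mx is None or mx < o else mx
--     if mn is None:
--         return {'min': 999, 'max': 999, 'span': 1}
--     return {'min': mn, 'max': mx, 'span': mx - mn + 1}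
-- ===== Notes on version B (the rewrite author's own statement) =====
-- stated objective: simpler
-- what changed: Replaces list-building, a filter pass, three min/max passes and the redundant empty-members special case by a single accumulator loop keeping running min/max of the non-999 orders.
import Mathlib
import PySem

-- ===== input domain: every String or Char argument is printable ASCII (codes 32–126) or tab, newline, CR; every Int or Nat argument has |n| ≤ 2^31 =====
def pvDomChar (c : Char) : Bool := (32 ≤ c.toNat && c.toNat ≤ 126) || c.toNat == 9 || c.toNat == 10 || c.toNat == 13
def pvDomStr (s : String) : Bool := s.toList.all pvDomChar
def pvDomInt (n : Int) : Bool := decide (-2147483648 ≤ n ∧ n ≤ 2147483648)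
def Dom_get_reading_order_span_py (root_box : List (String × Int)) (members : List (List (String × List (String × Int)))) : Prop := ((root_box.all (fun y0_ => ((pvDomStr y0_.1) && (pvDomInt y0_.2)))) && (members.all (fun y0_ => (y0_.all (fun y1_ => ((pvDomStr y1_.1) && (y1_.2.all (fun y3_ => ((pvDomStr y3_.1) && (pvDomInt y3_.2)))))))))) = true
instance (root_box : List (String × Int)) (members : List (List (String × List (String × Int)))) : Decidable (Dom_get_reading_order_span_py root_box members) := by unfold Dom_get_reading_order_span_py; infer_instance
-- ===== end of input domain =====

-- B replaces A's list-building + filter + three min/max passes (and the redundant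
-- empty-members branch) by one accumulator pass over the orders; same return value.

-- ===== PORT A =====
def pvA_boxOrd (m : List (String × List (String × Int))) : Int :=
  PySem.Dict.getD (PySem.Dict.mk ((PySem.Dict.get? (PySem.Dict.mk m) "box").getD [])) "reading_order" 999

def get_reading_order_span_py (root_box : List (String × Int)) (members : List (List (String × List (String × Int)))) : List (String × Int) :=
  if members = [] then
    let root_order := PySem.Dict.getD (PySem.Dict.mk root_box) "reading_order" 999
    [("min", root_order), ("max", root_order), ("span", 1)]
  else
    let all_orders := PySem.Dict.getD (PySem.Dict.mk root_box) "reading_order" 999 :: members.map pvA_boxOrd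
    let valid_orders := all_orders.filter (fun o => o != 999)
    if valid_orders = [] then [("min", 999), ("max", 999), ("span", 1)]
    else
      [("min", (PySem.List.min? valid_orders (fun x => x)).getD 0),
       ("max", (PySem.List.max? valid_orders (fun x => x)).getD 0),
       ("span", (PySem.List.max? valid_orders (fun x => x)).getD 0 - (PySem.List.min? valid_orders (fun x => x)).getD 0 + 1)]

-- ===== PORT B =====
def pvB_boxOrd (m : List (String × List (String × Int))) : Int :=
  PySem.Dict.getD (PySem.Dict.mk ((PySem.Dict.get? (PySem.Dict.mk m) "box").getD [])) "reading_order" 999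

def pvB_step (s : Option Int × Option Int) (m : List (String × List (String × Int))) : Option Int × Option Int :=
  let o := pvB_boxOrd m
  if o != 999 then
    (some (match s.1 with | none => o | some mn => if o < mn then o else mn),
     some (match s.2 with | none => o | some mx => if mx < o then o else mx))
  else s

def get_reading_order_span_py_alt (root_box : List (String × Int)) (members : List (List (String × List (String × Int)))) : List (String × Int) :=
  let o := PySem.Dict.getD (PySem.Dict.mk root_box) "reading_order" 999
  let init : Option Int × Option Int := if o != 999 then (some o, some o) else (none, none)
  match members.foldl pvB_step init with
  | (some mn, some mx) => [("min", mn), ("max", mx), ("span", mx - mn + 1)]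
  | _ => [("min", 999), ("max", 999), ("span", 1)]

-- ===== PRECONDITION & SPEC =====
-- Pre_ excludes members lacking a 'box' key, on which Python A raises KeyError.
def Pre_get_reading_order_span_py (_root_box : List (String × Int)) (members : List (List (String × List (String × Int)))) : Prop :=
  ∀ m ∈ members, (PySem.Dict.get? (PySem.Dict.mk m) "box").isSome = true
instance (root_box : List (String × Int)) (members : List (List (String × List (String × Int)))) : Decidable (Pre_get_reading_order_span_py root_box members) := by unfold Pre_get_reading_order_span_py; infer_instance

def pvWitness_get_reading_order_span_py : (List (String × Int)) × (List (List (String × List (String × Int)))) :=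
  ([("reading_order", 3)], [[("box", [("reading_order", 5)])]])

def Spec_get_reading_order_span_py (root_box : List (String × Int)) (members : List (List (String × List (String × Int)))) (out : List (String × Int)) : Prop := out = get_reading_order_span_py_alt root_box members
instance (root_box : List (String × Int)) (members : List (List (String × List (String × Int)))) (out : List (String × Int)) : Decidable (Spec_get_reading_order_span_py root_box members out) := by unfold Spec_get_reading_order_span_py; infer_instance

-- ===== CLAIM (what is proved, stated in full; the proofs are below) =====
def Claim_equal_get_reading_order_span_py : Prop := ∀ (root_box : List (String × Int)) (members : List (List (String × List (String × Int)))), Dom_get_reading_order_span_py root_box members → Pre_get_reading_order_span_py root_box members → Spec_get_reading_order_span_py root_box members (get_reading_order_span_py root_box members)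

-- ===== LEMMAS AND PROOFS =====
def pvOMin (s : Option Int) (o : Int) : Option Int :=
  some (match s with | none => o | some mn => if o < mn then o else mn)
def pvOMax (s : Option Int) (o : Int) : Option Int :=
  some (match s with | none => o | some mx => if mx < o then o else mx)

theorem pvFoldStep : ∀ (L : List (List (String × List (String × Int)))) (s : Option Int × Option Int),
    L.foldl pvB_step s =
      (((L.map pvB_boxOrd).filter (fun o => o != 999)).foldl pvOMin s.1,
       ((L.map pvB_boxOrd).filter (fun o => o != 999)).foldl pvOMax s.2) := by
  intro L
  induction L with
  | nil => intro s; simp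
  | cons m t ih =>
    intro s
    simp only [List.foldl_cons, List.map_cons, List.filter_cons]
    by_cases h : pvB_boxOrd m != 999
    · simp only [h, if_pos]
      rw [ih]
      simp [pvB_step, h, pvOMin, pvOMax]
    · simp only [h, Bool.false_eq_true, if_false]
      rw [ih]
      have : pvB_step s m = s := by simp [pvB_step, h]
      rw [this]
theorem pvOMin_some (x o : Int) : pvOMin (some x) o = some (min x o) := by
  have h : (if o < x then o else x) = min x o := by rw [min_def]; split_ifs <;> omega
  simp only [pvOMin]; rw [h]

theorem pvOMax_some (x o : Int) : pvOMax (some x) o = some (max x o) := by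
  have h : (if x < o then o else x) = max x o := by rw [max_def]; split_ifs <;> omega
  simp only [pvOMax]; rw [h]

theorem pvFoldOMin : ∀ (t : List Int) (x : Int), t.foldl pvOMin (some x) = some (t.foldl min x) := by
  intro t
  induction t with
  | nil => intro x; rfl
  | cons y t ih => intro x; simp only [List.foldl_cons, pvOMin_some, ih]

theorem pvFoldOMax : ∀ (t : List Int) (x : Int), t.foldl pvOMax (some x) = some (t.foldl max x) := by
  intro t
  induction t with
  | nil => intro x; rfl
  | cons y t ih => intro x; simp only [List.foldl_cons, pvOMax_some, ih]

-- ===== VERDICT (by name: the statement is the Claim_ definition above) =====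
theorem get_reading_order_span_py_spec : Claim_equal_get_reading_order_span_py := by
  intro root_box members _ _
  unfold Spec_get_reading_order_span_py
  simp only [get_reading_order_span_py, get_reading_order_span_py_alt]
  rw [pvFoldStep]
  have hbox : pvA_boxOrd = pvB_boxOrd := rfl
  rw [hbox]
  generalize PySem.Dict.getD (PySem.Dict.mk root_box) "reading_order" 999 = r
  by_cases hm : members = []
  · subst hm
    by_cases h9 : (r != 999) = true
    · simp [h9]
    · have h99 : r = 999 := by simpa using h9
      simp [h99]
  · simp only [if_neg hm, List.filter_cons]
    rcases hfc : List.filter (fun o => o != 999) (List.map pvB_boxOrd members) with _ | ⟨v, t⟩ <;>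
      by_cases h9 : (r != 999) = true
    · simp [h9, PySem.List.min?_id_cons, PySem.List.max?_id_cons]
    · simp [h9]
    · simp only [h9, if_pos, List.foldl_cons, pvOMin_some, pvOMax_some, pvFoldOMin, pvFoldOMax,
        PySem.List.min?_id_cons, PySem.List.max?_id_cons]
      simp
    · simp only [h9, Bool.false_eq_true, if_false, List.foldl_cons,
        PySem.List.min?_id_cons, PySem.List.max?_id_cons]
      have h1 : pvOMin none v = some v := rfl
      have h2 : pvOMax none v = some v := rfl
      rw [h1, h2, pvFoldOMin, pvFoldOMax]
      simp
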